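-- pv_equiv track=rewrite | github.com/RM9555/ipo-calculator | app.py | parse_application_input
-- ===== SOURCE A (Python) =====
-- from typing import List, Dict
--
-- def parse_application_input(input_str: str) -> List[str]:
--     """Parse input string into list of categories"""
--     if not input_str:
--         return []
--
--     categories = []
--     parts = input_str.lower().split()
--
--     i = 0
--     while i < len(parts):
--         if parts[i].isdigit() and i + 1 < len(parts):
--             count = int(parts[i])
--             category = parts[i + 1]
--             if category not in ['retail', 'shni', 'bhni']:
--                 raise ValueError(f"Invalid category: {category}")
--             categories.extend([category] * count)
--             i += 2
--         else:
--             if parts[i] not in ['retail', 'shni', 'bhni']: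
--                 raise ValueError(f"Invalid category: {parts[i]}")
--             categories.append(parts[i])
--             i += 1
--
--     return categories
-- ===== SOURCE B (Python) =====
-- from typing import List
--
--
-- def parse_application_input(input_str: str) -> List[str]:
--     """Parse input string into list of categories"""
--     categories = []
--     pending = None  # count token waiting for its category
--     for tok in input_str.lower().split():
--         if pending is None:
--             if tok.isdigit():
--                 pending = tok
--             elif tok in ('retail', 'shni', 'bhni'):
--                 categories.append(tok)
--             else:
--                 raise ValueError(f"Invalid category: {tok}")
--         else:
--             if tok not in ('retail', 'shni', 'bhni'):
--                 raise ValueError(f"Invalid category: {tok}")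
--             categories.extend([tok] * int(pending))
--             pending = None
--     if pending is not None:
--         raise ValueError(f"Invalid category: {pending}")
--     return categories
-- ===== Notes on version B (the rewrite author's own statement) =====
-- stated objective: alternative
-- what changed: Replaced the index-based while loop with i += 2/1 lookahead by a single forward pass that carries a pending count token in a state variable, pairing it with the next category token.
import Mathlib
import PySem

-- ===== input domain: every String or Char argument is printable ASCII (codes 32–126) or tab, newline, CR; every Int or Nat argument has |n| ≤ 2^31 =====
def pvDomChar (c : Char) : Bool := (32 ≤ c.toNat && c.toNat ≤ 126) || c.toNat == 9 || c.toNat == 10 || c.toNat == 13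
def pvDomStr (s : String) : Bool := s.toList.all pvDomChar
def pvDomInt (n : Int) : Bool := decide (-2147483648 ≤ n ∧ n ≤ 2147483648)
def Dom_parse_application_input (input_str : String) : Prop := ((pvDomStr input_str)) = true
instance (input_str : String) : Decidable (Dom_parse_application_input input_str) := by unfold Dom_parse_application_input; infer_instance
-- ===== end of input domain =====

-- B rewrites A's index-with-lookahead while loop as one forward fold carrying a pending count
-- token; same cost, no speed claim. Equivalence is over the return value on inputs where A
-- returns (Pre_ excludes exactly the ValueError inputs, on which B raises too).

-- ===== PORT A =====
def pvCats : List String := ["retail", "shni", "bhni"]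

-- the while loop: `acc` is `categories`, the list argument is `parts[i:]`
def pvLoopA (acc : List String) : List String → List String
  | [] => acc
  | [p] =>
      -- i + 1 < len(parts) fails: else branch
      if p ∈ pvCats then pvLoopA (acc ++ [p]) [] else acc   -- else: raise ValueError
  | p :: category :: rest =>
      if PySem.Str.strIsdigit p then
        if category ∈ pvCats then
          pvLoopA (acc ++ List.replicate ((PySem.Int.ofStr? p).getD 0).toNat category) rest
        else acc                                            -- raise ValueError
      else
        if p ∈ pvCats then pvLoopA (acc ++ [p]) (category :: rest)
        else acc                                            -- raise ValueError

def parse_application_input (input_str : String) : List String :=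
  if input_str = "" then []
  else pvLoopA [] (PySem.Str.split₀ (PySem.Str.lower input_str))

-- ===== PORT B =====
-- fold state: (categories so far, pending count token)
def pvStepB (st : List String × Option String) (tok : String) : List String × Option String :=
  match st with
  | (res, none) =>
      if PySem.Str.strIsdigit tok then (res, some tok)
      else if tok ∈ pvCats then (res ++ [tok], none)
      else (res, none)                                      -- raise ValueError
  | (res, some c) =>
      if tok ∈ pvCats then
        (res ++ List.replicate ((PySem.Int.ofStr? c).getD 0).toNat tok, none)
      else (res, none)                                      -- raise ValueError

def parse_application_input_alt (input_str : String) : List String :=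
  (((PySem.Str.split₀ (PySem.Str.lower input_str)).foldl pvStepB ([], none)).1)
  -- a trailing pending token raises ValueError in Python B (outside Pre_)

-- ===== PRECONDITION & SPEC =====
-- closed-form "A returns normally": every whitespace token of the lowercased input is a digit
-- token or a category, and every digit token is immediately followed by a category token
def pvOkTokens (ts : List String) : Prop :=
  ∀ i < ts.length,
    (PySem.Str.strIsdigit (ts.getD i "") = true ∨ ts.getD i "" ∈ pvCats) ∧
    (PySem.Str.strIsdigit (ts.getD i "") = true →
      i + 1 < ts.length ∧ ts.getD (i + 1) "" ∈ pvCats)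

-- Pre_ excludes exactly the inputs on which A raises ValueError (invalid token, digit token
-- not followed by a category, trailing digit token)
def Pre_parse_application_input (input_str : String) : Prop :=
  pvOkTokens (PySem.Str.split₀ (PySem.Str.lower input_str))

instance (input_str : String) : Decidable (Pre_parse_application_input input_str) := by
  unfold Pre_parse_application_input pvOkTokens; infer_instance

def pvWitness_parse_application_input : String := "2 Retail shni"

def Spec_parse_application_input (input_str : String) (out : List String) : Prop :=
  out = parse_application_input_alt input_str
instance (input_str : String) (out : List String) : Decidable (Spec_parse_application_input input_str out) := by unfold Spec_parse_application_input; infer_instance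

-- ===== CLAIM (what is proved, stated in full; the proofs are below) =====
def Claim_equal_parse_application_input : Prop := ∀ (input_str : String), Dom_parse_application_input input_str → Pre_parse_application_input input_str → Spec_parse_application_input input_str (parse_application_input input_str)

-- ===== LEMMAS AND PROOFS =====

-- boolean grammar check used only by the proofs
def pvGood : List String → Bool
  | [] => true
  | p :: rest =>
      if PySem.Str.strIsdigit p then
        match rest with
        | [] => false
        | c :: rest' => decide (c ∈ pvCats) && pvGood rest'
      else decide (p ∈ pvCats) && pvGood rest

theorem pvOkTokens_good (ts : List String) :
    pvOkTokens ts → pvGood ts = true := by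
  induction ts using pvGood.induct with
  | case1 => intro _; rfl
  | case2 p hd =>
      intro h
      have h0 := (h 0 (by simp)).2
      simp only [List.getD_cons_zero] at h0
      exact absurd (h0 hd).1 (by simp)
  | case3 p hd c rest' ih =>
      intro h
      have h0 := (h 0 (by simp)).2
      simp only [List.getD_cons_zero, List.getD_cons_succ] at h0
      have hc := (h0 hd).2
      simp only [pvGood]
      rw [if_pos hd]
      simp only [Bool.and_eq_true, decide_eq_true_eq]
      refine ⟨hc, ih (fun i hi => ?_)⟩
      have hh := h (i + 2) (by simpa using Nat.add_lt_add_right hi 2)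
      simp only [List.getD_cons_succ] at hh
      refine ⟨hh.1, fun hdig => ?_⟩
      have h2 := hh.2 hdig
      simp only [List.length_cons] at h2 ⊢
      exact ⟨by omega, h2.2⟩
  | case4 p rest' hd ih =>
      intro h
      have h0 := h 0 (by simp)
      simp only [List.getD_cons_zero] at h0
      have hp : p ∈ pvCats := h0.1.resolve_left hd
      have hrest : pvGood rest' = true := by
        refine ih (fun i hi => ?_)
        have hh := h (i + 1) (by simpa using Nat.add_lt_add_right hi 1)
        simp only [List.getD_cons_succ] at hh
        refine ⟨hh.1, fun hdig => ?_⟩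
        have h2 := hh.2 hdig
        simp only [List.length_cons] at h2 ⊢
        exact ⟨by omega, h2.2⟩
      cases rest' with
      | nil =>
          simp only [pvGood]
          rw [if_neg hd]
          simp [hp]
      | cons c r =>
          simp only [pvGood]
          rw [if_neg hd]
          simp only [Bool.and_eq_true, decide_eq_true_eq]
          exact ⟨hp, hrest⟩

theorem pvLoopA_eq_fold (ts : List String) :
    pvGood ts = true → ∀ acc, pvLoopA acc ts = (ts.foldl pvStepB (acc, none)).1 := by
  induction ts using pvGood.induct with
  | case1 => intro _ acc; rfl
  | case2 p hd =>
      intro h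
      simp only [pvGood] at h
      rw [if_pos hd] at h
      simp at h
  | case3 p hd c rest' ih =>
      intro h acc
      simp only [pvGood] at h
      rw [if_pos hd] at h
      simp only [Bool.and_eq_true, decide_eq_true_eq] at h
      obtain ⟨hc, hg⟩ := h
      simp only [pvLoopA]
      rw [if_pos hd, if_pos hc]
      rw [List.foldl_cons, List.foldl_cons]
      have s1 : pvStepB (acc, none) p = (acc, some p) := by
        simp only [pvStepB]; rw [if_pos hd]
      have s2 : pvStepB (acc, some p) c =
          (acc ++ List.replicate ((PySem.Int.ofStr? p).getD 0).toNat c, none) := by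
        simp only [pvStepB]; rw [if_pos hc]
      rw [s1, s2]
      exact ih hg _
  | case4 p rest' hd ih =>
      intro h acc
      cases rest' with
      | nil =>
          simp only [pvGood] at h
          rw [if_neg hd] at h
          simp only [Bool.and_eq_true, decide_eq_true_eq] at h
          have hp := h.1
          simp only [pvLoopA]
          rw [if_pos hp]
          simp only [List.foldl_cons, List.foldl_nil, pvStepB]
          rw [if_neg hd, if_pos hp]
      | cons c rest'' =>
          simp only [pvGood] at h
          rw [if_neg hd] at h
          simp only [Bool.and_eq_true, decide_eq_true_eq] at h
          obtain ⟨hp, hg⟩ := h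
          simp only [pvLoopA]
          rw [if_neg hd, if_pos hp, List.foldl_cons]
          have s1 : pvStepB (acc, none) p = (acc ++ [p], none) := by
            simp only [pvStepB]; rw [if_neg hd, if_pos hp]
          rw [s1]
          exact ih hg _

-- ===== VERDICT (by name: the statement is the Claim_ definition above) =====
theorem parse_application_input_spec : Claim_equal_parse_application_input := by
  intro s _dom hpre
  unfold Spec_parse_application_input
  by_cases hs : s = ""
  · subst hs; decide
  · unfold parse_application_input parse_application_input_alt
    rw [if_neg hs]
    exact pvLoopA_eq_fold _ (pvOkTokens_good _ hpre) []
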